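-- pv_equiv track=rewrite | github.com/estrellita12/programming | programmers/level1/42840_모의고사.py | solution
-- ===== SOURCE A (Python) =====
-- def solution(answers):
--     answer = []
--     s1list = [1,2,3,4,5]
--     s2list = [2,1,2,3,2,4,2,5]
--     s3list = [3,3,1,1,2,2,4,4,5,5]
--     score = [0,0,0]
--     for i in range(len(answers)):
--         if s1list[i%5] == answers[i]:
--             score[0]+=1
--         if s2list[i%8] == answers[i]:
--             score[1]+=1
--         if s3list[i%10] == answers[i]:
--             score[2]+=1
--     maxData = max(score)
--     for i in range(3):
--         if score[i]==maxData:
--             answer.append(i+1)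
--
--     return answer
-- ===== SOURCE B (Python) =====
-- def score_of(pattern, answers):
--     cyc = list(pattern)
--     s = 0
--     for a in answers:
--         if a == cyc[0]:
--             s += 1
--         cyc = cyc[1:] + cyc[:1]
--     return s
--
-- def solution(answers):
--     patterns = [[1, 2, 3, 4, 5],
--                 [2, 1, 2, 3, 2, 4, 2, 5],
--                 [3, 3, 1, 1, 2, 2, 4, 4, 5, 5]]
--     scores = [score_of(p, answers) for p in patterns]
--     best = max(scores)
--     return [i + 1 for i, s in enumerate(scores) if s == best]
-- ===== Notes on version B (the rewrite author's own statement) =====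
-- stated objective: alternative
-- what changed: Instead of one interleaved loop updating three counters via modular indexing into all three pattern lists, B scores each pattern in its own pass by rotating a copy of the pattern one step per answer (no index arithmetic), then selects the winners by a comprehension over the enumerated score list.
import Mathlib
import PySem

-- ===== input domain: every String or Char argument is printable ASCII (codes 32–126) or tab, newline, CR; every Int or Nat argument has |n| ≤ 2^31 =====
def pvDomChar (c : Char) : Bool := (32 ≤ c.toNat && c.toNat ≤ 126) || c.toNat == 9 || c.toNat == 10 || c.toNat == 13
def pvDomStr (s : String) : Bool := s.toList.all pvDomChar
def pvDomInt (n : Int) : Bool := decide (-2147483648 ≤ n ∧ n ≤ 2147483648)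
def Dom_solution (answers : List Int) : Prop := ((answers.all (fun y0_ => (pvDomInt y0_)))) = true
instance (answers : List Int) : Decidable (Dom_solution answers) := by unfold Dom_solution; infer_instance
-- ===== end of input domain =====

-- B replaces A's single interleaved modular-index loop by one rotating-cycle pass per pattern
-- plus a comprehension over the enumerated scores (objective: alternative, same cost).

-- ===== PORT A =====
-- score = [0,0,0] is ported as the triple of its three counters; list indexing by
-- i % len and i is always in range here, so getD is exact.
def solution (answers : List Int) : List Int :=
  let s1list : List Int := [1, 2, 3, 4, 5]
  let s2list : List Int := [2, 1, 2, 3, 2, 4, 2, 5]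
  let s3list : List Int := [3, 3, 1, 1, 2, 2, 4, 4, 5, 5]
  let score :=
    (List.range answers.length).foldl
      (fun (sc : Int × Int × Int) i =>
        let sc := if s1list.getD (i % 5) 0 = answers.getD i 0 then (sc.1 + 1, sc.2.1, sc.2.2) else sc
        let sc := if s2list.getD (i % 8) 0 = answers.getD i 0 then (sc.1, sc.2.1 + 1, sc.2.2) else sc
        if s3list.getD (i % 10) 0 = answers.getD i 0 then (sc.1, sc.2.1, sc.2.2 + 1) else sc)
      (0, 0, 0)
  let maxData := (PySem.List.max? [score.1, score.2.1, score.2.2] (fun x => x)).getD 0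
  (List.range 3).foldl
    (fun answer i =>
      if [score.1, score.2.1, score.2.2].getD i 0 = maxData then answer ++ [(i : Int) + 1] else answer)
    []

-- ===== PORT B =====
-- cyc[0] is exact as headD here since the cycle stays a nonempty rotation of the pattern.
def scoreOf (pattern : List Int) (answers : List Int) : Int :=
  (answers.foldl
    (fun (st : Int × List Int) a =>
      ((if a = st.2.headD 0 then st.1 + 1 else st.1), st.2.drop 1 ++ st.2.take 1))
    (0, pattern)).1

def solution_alt (answers : List Int) : List Int :=
  let patterns : List (List Int) :=
    [[1, 2, 3, 4, 5], [2, 1, 2, 3, 2, 4, 2, 5], [3, 3, 1, 1, 2, 2, 4, 4, 5, 5]]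
  let scores := patterns.map (fun p => scoreOf p answers)
  let best := (PySem.List.max? scores (fun x => x)).getD 0
  ((PySem.List.enumerate scores 0).filter (fun is => is.2 == best)).map (fun is => is.1 + 1)

-- ===== PRECONDITION & SPEC =====
def Spec_solution (answers : List Int) (out : List Int) : Prop := out = solution_alt answers
instance (answers : List Int) (out : List Int) : Decidable (Spec_solution answers out) := by unfold Spec_solution; infer_instance

-- ===== CLAIM (what is proved, stated in full; the proofs are below) =====
def Claim_equal_solution : Prop := ∀ (answers : List Int), Dom_solution answers → Spec_solution answers (solution answers)

-- ===== LEMMAS AND PROOFS =====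

-- rotation helpers (proof-side only)
def rot1 (l : List Int) : List Int := l.drop 1 ++ l.take 1
def rotN (r : Nat) (l : List Int) : List Int := l.drop r ++ l.take r

-- number of matches of a rotating cycle against the answers
def cntC : List Int → List Int → Int
  | _, [] => 0
  | cyc, a :: t => (if cyc.headD 0 = a then (1 : Int) else 0) + cntC (rot1 cyc) t

lemma rotP1_head : ∀ r < 5, (rotN r ([1,2,3,4,5] : List Int)).headD 0 = ([1,2,3,4,5] : List Int).getD r 0 := by decide
lemma rotP2_head : ∀ r < 8, (rotN r ([2,1,2,3,2,4,2,5] : List Int)).headD 0 = ([2,1,2,3,2,4,2,5] : List Int).getD r 0 := by decide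
lemma rotP3_head : ∀ r < 10, (rotN r ([3,3,1,1,2,2,4,4,5,5] : List Int)).headD 0 = ([3,3,1,1,2,2,4,4,5,5] : List Int).getD r 0 := by decide
lemma rotP1_step : ∀ r < 5, rot1 (rotN r ([1,2,3,4,5] : List Int)) = rotN ((r+1) % 5) ([1,2,3,4,5] : List Int) := by decide
lemma rotP2_step : ∀ r < 8, rot1 (rotN r ([2,1,2,3,2,4,2,5] : List Int)) = rotN ((r+1) % 8) ([2,1,2,3,2,4,2,5] : List Int) := by decide
lemma rotP3_step : ∀ r < 10, rot1 (rotN r ([3,3,1,1,2,2,4,4,5,5] : List Int)) = rotN ((r+1) % 10) ([3,3,1,1,2,2,4,4,5,5] : List Int) := by decide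

-- B's fold invariant
lemma scoreOf_inv (ans : List Int) : ∀ (cyc : List Int) (s : Int),
    (ans.foldl
      (fun (st : Int × List Int) a =>
        ((if a = st.2.headD 0 then st.1 + 1 else st.1), st.2.drop 1 ++ st.2.take 1))
      (s, cyc)).1 = s + cntC cyc ans := by
  induction ans with
  | nil => intro cyc s; simp [cntC]
  | cons a t ih =>
      intro cyc s
      simp only [List.foldl_cons, cntC, rot1]
      rw [ih]
      by_cases h : a = cyc.headD 0
      · rw [if_pos h, if_pos h.symm]; ring
      · rw [if_neg h, if_neg (fun hh => h hh.symm)]; ring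

lemma scoreOf_eq (p ans : List Int) : scoreOf p ans = cntC p ans := by
  unfold scoreOf; rw [scoreOf_inv]; ring

-- A's interleaved loop, generalized over the starting offset
lemma loopA (ans : List Int) : ∀ (off : Nat) (c : Int × Int × Int),
    (List.range ans.length).foldl
      (fun (sc : Int × Int × Int) i =>
        let sc := if ([1,2,3,4,5] : List Int).getD ((off + i) % 5) 0 = ans.getD i 0 then (sc.1 + 1, sc.2.1, sc.2.2) else sc
        let sc := if ([2,1,2,3,2,4,2,5] : List Int).getD ((off + i) % 8) 0 = ans.getD i 0 then (sc.1, sc.2.1 + 1, sc.2.2) else sc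
        if ([3,3,1,1,2,2,4,4,5,5] : List Int).getD ((off + i) % 10) 0 = ans.getD i 0 then (sc.1, sc.2.1, sc.2.2 + 1) else sc) c
    = (c.1 + cntC (rotN (off % 5) [1,2,3,4,5]) ans,
       c.2.1 + cntC (rotN (off % 8) [2,1,2,3,2,4,2,5]) ans,
       c.2.2 + cntC (rotN (off % 10) [3,3,1,1,2,2,4,4,5,5]) ans) := by
  induction ans with
  | nil => intro off c; simp [cntC]
  | cons a t ih =>
      intro off c
      rw [List.length_cons, List.range_succ_eq_map, List.foldl_cons, List.foldl_map]
      have hstep :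
          (fun (sc : Int × Int × Int) (i : Nat) =>
            (fun (sc : Int × Int × Int) i =>
              let sc := if ([1,2,3,4,5] : List Int).getD ((off + i) % 5) 0 = (a :: t).getD i 0 then (sc.1 + 1, sc.2.1, sc.2.2) else sc
              let sc := if ([2,1,2,3,2,4,2,5] : List Int).getD ((off + i) % 8) 0 = (a :: t).getD i 0 then (sc.1, sc.2.1 + 1, sc.2.2) else sc
              if ([3,3,1,1,2,2,4,4,5,5] : List Int).getD ((off + i) % 10) 0 = (a :: t).getD i 0 then (sc.1, sc.2.1, sc.2.2 + 1) else sc) sc (i + 1))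
          = (fun (sc : Int × Int × Int) i =>
              let sc := if ([1,2,3,4,5] : List Int).getD ((off + 1 + i) % 5) 0 = t.getD i 0 then (sc.1 + 1, sc.2.1, sc.2.2) else sc
              let sc := if ([2,1,2,3,2,4,2,5] : List Int).getD ((off + 1 + i) % 8) 0 = t.getD i 0 then (sc.1, sc.2.1 + 1, sc.2.2) else sc
              if ([3,3,1,1,2,2,4,4,5,5] : List Int).getD ((off + 1 + i) % 10) 0 = t.getD i 0 then (sc.1, sc.2.1, sc.2.2 + 1) else sc) := by
        funext sc i
        beta_reduce
        rw [show off + (i + 1) = off + 1 + i from by omega]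
        simp only [List.getD_cons_succ]
      rw [hstep, ih]
      have e1 : cntC (rotN ((off + 1) % 5) [1,2,3,4,5]) t = cntC (rot1 (rotN (off % 5) [1,2,3,4,5])) t := by
        rw [rotP1_step (off % 5) (Nat.mod_lt _ (by norm_num)), show (off % 5 + 1) % 5 = (off + 1) % 5 from by omega]
      have e2 : cntC (rotN ((off + 1) % 8) [2,1,2,3,2,4,2,5]) t = cntC (rot1 (rotN (off % 8) [2,1,2,3,2,4,2,5])) t := by
        rw [rotP2_step (off % 8) (Nat.mod_lt _ (by norm_num)), show (off % 8 + 1) % 8 = (off + 1) % 8 from by omega]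
      have e3 : cntC (rotN ((off + 1) % 10) [3,3,1,1,2,2,4,4,5,5]) t = cntC (rot1 (rotN (off % 10) [3,3,1,1,2,2,4,4,5,5])) t := by
        rw [rotP3_step (off % 10) (Nat.mod_lt _ (by norm_num)), show (off % 10 + 1) % 10 = (off + 1) % 10 from by omega]
      rw [e1, e2, e3]
      simp only [cntC, List.getD_cons_zero, Nat.add_zero,
        rotP1_head (off % 5) (Nat.mod_lt _ (by norm_num)),
        rotP2_head (off % 8) (Nat.mod_lt _ (by norm_num)),
        rotP3_head (off % 10) (Nat.mod_lt _ (by norm_num))]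
      split_ifs <;> simp only [Prod.mk.injEq] <;> exact ⟨by ring, by ring, by ring⟩

-- common tail: pick the winners among three scores
lemma tail_eq (x y z : Int) :
    (List.range 3).foldl
      (fun (answer : List Int) i =>
        if [x, y, z].getD i 0 = (PySem.List.max? [x, y, z] (fun v => v)).getD 0 then answer ++ [(i : Int) + 1] else answer)
      []
    = ((PySem.List.enumerate [x, y, z] 0).filter
        (fun is => is.2 == (PySem.List.max? [x, y, z] (fun v => v)).getD 0)).map (fun is => is.1 + 1) := by
  simp only [show List.range 3 = [0, 1, 2] from rfl, List.foldl_cons, List.foldl_nil,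
    PySem.List.enumerate_cons, PySem.List.enumerate_nil, List.filter_cons, List.filter_nil,
    List.getD_cons_zero, List.getD_cons_succ, beq_iff_eq]
  norm_num
  split_ifs <;> simp

-- ===== VERDICT (by name: the statement is the Claim_ definition above) =====
theorem solution_spec : Claim_equal_solution := by
  intro answers _
  show solution answers = solution_alt answers
  have hA := loopA answers 0 (0, 0, 0)
  simp only [Nat.zero_add, Nat.zero_mod] at hA
  rw [show rotN 0 [1,2,3,4,5] = [1,2,3,4,5] from by simp [rotN],
      show rotN 0 [2,1,2,3,2,4,2,5] = [2,1,2,3,2,4,2,5] from by simp [rotN],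
      show rotN 0 [3,3,1,1,2,2,4,4,5,5] = [3,3,1,1,2,2,4,4,5,5] from by simp [rotN]] at hA
  unfold solution solution_alt
  simp only [List.map_cons, List.map_nil, scoreOf_eq]
  rw [hA]
  simp only [zero_add]
  exact tail_eq _ _ _
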